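-- pv_equiv track=rewrite | github.com/nietsdoenster/eurovisionfiles | examenopdracht.py | count_other_countries
-- ===== SOURCE A (Python) =====
-- def count_other_countries(tokens):
-- 	first1 = tokens
-- 	count = 0
-- 	for token in first1:
-- 		if token in ['Hungary', 'Albania', 'Moldova', 'Moldavia', 'Romania']:
-- 			count +=1
-- 		else:
-- 			None
-- 	return count
-- ===== SOURCE B (Python) =====
-- COUNTRIES = ('Hungary', 'Albania', 'Moldova', 'Moldavia', 'Romania')
--
-- def count_other_countries(tokens):
--     total = 0
--     for c in COUNTRIES:
--         total += tokens.count(c)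
--     return total
-- ===== Notes on version B (the rewrite author's own statement) =====
-- stated objective: alternative
-- what changed: B inverts the loop structure: instead of one scan over tokens with a membership test against the five-name list, B loops over the five fixed country names and sums tokens.count(c) for each, i.e. five equality-only scans with no membership branch.
import Mathlib
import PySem

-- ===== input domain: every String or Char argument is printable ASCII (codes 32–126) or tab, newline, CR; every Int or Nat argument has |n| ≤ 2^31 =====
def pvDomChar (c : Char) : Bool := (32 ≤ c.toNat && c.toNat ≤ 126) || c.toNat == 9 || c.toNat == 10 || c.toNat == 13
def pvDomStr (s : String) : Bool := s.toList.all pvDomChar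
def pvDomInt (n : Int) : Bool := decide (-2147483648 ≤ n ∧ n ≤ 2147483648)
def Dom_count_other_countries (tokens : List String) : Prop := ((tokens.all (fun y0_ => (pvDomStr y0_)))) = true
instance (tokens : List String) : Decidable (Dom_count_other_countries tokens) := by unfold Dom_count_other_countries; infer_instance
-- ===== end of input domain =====

-- B inverts the loop structure: it loops over the five fixed country names and sums tokens.count(c),
-- instead of scanning tokens once with a membership test (objective: alternative, same cost).

-- ===== PORT A =====
def count_other_countries (tokens : List String) : Int :=
  tokens.foldl
    (fun count token =>
      if token ∈ ["Hungary", "Albania", "Moldova", "Moldavia", "Romania"] then count + 1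
      else count)
    0

-- ===== PORT B =====
-- B: loop over the five country names, summing tokens.count(c) for each.
def count_other_countries_alt (tokens : List String) : Int :=
  (["Hungary", "Albania", "Moldova", "Moldavia", "Romania"]).foldl
    (fun total c => total + (PySem.List.count tokens c : Int)) 0

-- ===== PRECONDITION & SPEC =====
def Spec_count_other_countries (tokens : List String) (out : Int) : Prop := out = count_other_countries_alt tokens
instance (tokens : List String) (out : Int) : Decidable (Spec_count_other_countries tokens out) := by unfold Spec_count_other_countries; infer_instance

-- ===== CLAIM =====
def Claim_equal_count_other_countries : Prop := ∀ (tokens : List String), Dom_count_other_countries tokens → Spec_count_other_countries tokens (count_other_countries tokens)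

-- ===== LEMMAS AND PROOFS =====
theorem pvA_foldl (ts : List String) (acc : Int) :
    ts.foldl
      (fun count token =>
        if token ∈ ["Hungary", "Albania", "Moldova", "Moldavia", "Romania"] then count + 1
        else count)
      acc
    = acc + (ts.count "Hungary" : Int) + ts.count "Albania" + ts.count "Moldova"
        + ts.count "Moldavia" + ts.count "Romania" := by
  induction ts generalizing acc with
  | nil => simp
  | cons t ts ih =>
    simp only [List.foldl_cons, ih]
    by_cases h : t ∈ ["Hungary", "Albania", "Moldova", "Moldavia", "Romania"]
    · simp only [List.mem_cons, List.not_mem_nil, or_false] at h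
      rcases h with h | h | h | h | h <;> subst h <;>
        simp <;> ring
    · have hne : ∀ c, c ∈ (["Hungary", "Albania", "Moldova", "Moldavia", "Romania"] : List String) → t ≠ c := by
        intro c hc he; exact h (he ▸ hc)
      simp only [if_neg h]
      rw [List.count_cons_of_ne (hne _ (by simp)), List.count_cons_of_ne (hne _ (by simp)),
          List.count_cons_of_ne (hne _ (by simp)), List.count_cons_of_ne (hne _ (by simp)),
          List.count_cons_of_ne (hne _ (by simp))]

-- ===== VERDICT =====
theorem count_other_countries_spec : Claim_equal_count_other_countries := by
  intro tokens _
  unfold Spec_count_other_countries count_other_countries count_other_countries_alt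
  rw [pvA_foldl]
  simp [List.foldl, PySem.List.count]
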